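-- pv_equiv track=rewrite | github.com/zornTang/PIC | scripts/generate_plots_for_request.py | _extract_gene_name
-- ===== SOURCE A (Python) =====
-- def _extract_gene_name(protein_id: str) -> str:
--     try:
--         parts = [p.strip() for p in str(protein_id).split('|')]
--         for p in parts:
--             if p.strip().startswith('Gene:'):
--                 return p.split(':', 1)[1].strip()
--     except Exception:
--         pass
--     return str(protein_id)
-- ===== SOURCE B (Python) =====
-- def _extract_gene_name(protein_id: str) -> str:
--     # Single left-to-right character scan: accumulate the current '|'-delimited
--     # segment; at each boundary strip it and test for the 'Gene:' prefix.
--     s = str(protein_id)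
--     cur = []
--     for ch in s + '|':
--         if ch == '|':
--             t = ''.join(cur).strip()
--             if t.startswith('Gene:'):
--                 return t[5:].strip()
--             cur = []
--         else:
--             cur.append(ch)
--     return s
-- ===== Notes on version B (the rewrite author's own statement) =====
-- stated objective: alternative
-- what changed: B replaces A's split-into-a-list + strip-comprehension + loop-over-parts with a single left-to-right character scan that accumulates the current pipe-delimited segment and tests it (strip, gene-prefix check, slice off the prefix) as soon as the segment is complete.
import Mathlib
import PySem

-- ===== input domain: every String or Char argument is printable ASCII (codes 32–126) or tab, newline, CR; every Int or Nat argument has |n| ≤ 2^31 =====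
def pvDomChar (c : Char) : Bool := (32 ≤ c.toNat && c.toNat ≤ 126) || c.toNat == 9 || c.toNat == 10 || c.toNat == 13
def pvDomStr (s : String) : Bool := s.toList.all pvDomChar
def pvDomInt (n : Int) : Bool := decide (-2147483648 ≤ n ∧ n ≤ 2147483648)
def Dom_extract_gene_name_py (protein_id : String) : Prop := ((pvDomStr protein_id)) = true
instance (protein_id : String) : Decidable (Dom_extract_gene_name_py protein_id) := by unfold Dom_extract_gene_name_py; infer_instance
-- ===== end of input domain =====

-- B replaces A's split-into-list + comprehension + loop with one character scan over
-- the string that tests each pipe-delimited segment as soon as it is complete (alternative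
-- decomposition; same return value, no speed claim).

-- ===== PORT A =====
-- the 'for p in parts: if …: return …' loop, returning the early-returned value if any
def pvGoA : List (List Char) → Option (List Char)
  | [] => none
  | p :: rest =>
    if PySem.Chars.startswith (PySem.Chars.strip p) ['G', 'e', 'n', 'e', ':'] then
      some (PySem.Chars.strip
        (PySem.List.pyGetD (PySem.Chars.splitOnMax p [':'] 1) 1 []))
    else pvGoA rest

def extract_gene_name_py (protein_id : String) : String :=
  let parts := (PySem.Chars.splitOn protein_id.toList ['|']).map PySem.Chars.strip
  match pvGoA parts with
  | some r => String.ofList r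
  | none => protein_id

-- ===== PORT B =====
-- the 'for ch in s + "|"' loop with accumulator cur, returning the early return if any
def pvGoB : List Char → List Char → Option (List Char)
  | _, [] => none
  | cur, c :: rest =>
    if c = '|' then
      let t := PySem.Chars.strip cur
      if PySem.Chars.startswith t ['G', 'e', 'n', 'e', ':'] then
        some (PySem.Chars.strip (PySem.List.slice t (some 5) none))
      else pvGoB [] rest
    else pvGoB (cur ++ [c]) rest

def extract_gene_name_py_alt (protein_id : String) : String :=
  match pvGoB [] (protein_id.toList ++ ['|']) with
  | some r => String.ofList r
  | none => protein_id

-- ===== PRECONDITION & SPEC =====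
def Spec_extract_gene_name_py (protein_id : String) (out : String) : Prop := out = extract_gene_name_py_alt protein_id
instance (protein_id : String) (out : String) : Decidable (Spec_extract_gene_name_py protein_id out) := by unfold Spec_extract_gene_name_py; infer_instance

-- ===== CLAIM (what is proved, stated in full; the proofs are below) =====
def Claim_equal_extract_gene_name_py : Prop := ∀ (protein_id : String), Dom_extract_gene_name_py protein_id → Spec_extract_gene_name_py protein_id (extract_gene_name_py protein_id)

-- ===== LEMMAS AND PROOFS =====

def pvConsHead (pre : List Char) : List (List Char) → List (List Char)
  | [] => [pre]
  | p :: ps => (pre ++ p) :: ps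
def pvSp : List Char → List (List Char)
  | [] => [[]]
  | c :: rest => if c = '|' then [] :: pvSp rest else pvConsHead [c] (pvSp rest)

theorem pvSp_ne_nil (l : List Char) : pvSp l ≠ [] := by
  cases l with
  | nil => simp [pvSp]
  | cons c rest =>
    simp only [pvSp]
    split
    · simp
    · cases h : pvSp rest <;> simp [pvConsHead]

theorem pvConsHead_nil (ps : List (List Char)) (h : ps ≠ []) : pvConsHead [] ps = ps := by
  cases ps with
  | nil => exact absurd rfl h
  | cons p ps => simp [pvConsHead]

theorem pvConsHead_assoc (a b : List Char) (ps : List (List Char)) :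
    pvConsHead a (pvConsHead b ps) = pvConsHead (a ++ b) ps := by
  cases ps <;> simp [pvConsHead]

theorem pv_splitOn_go (l : List Char) : ∀ (fuel : Nat) (cur : List Char) (acc : List (List Char)),
    l.length ≤ fuel →
    PySem.Chars.splitOn.go ['|'] fuel l cur acc = acc.reverse ++ pvConsHead cur.reverse (pvSp l) := by
  induction l with
  | nil =>
    intro fuel cur acc h
    cases fuel <;> simp [PySem.Chars.splitOn.go, pvSp, pvConsHead]
  | cons c rest ih =>
    intro fuel cur acc h
    cases fuel with
    | zero => simp at h
    | succ f =>
      simp only [PySem.Chars.splitOn.go]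
      by_cases hc : c = '|'
      · subst hc
        rw [if_pos (by simp [List.isPrefixOf])]
        have hd : List.drop (['|'] : List Char).length ('|' :: rest) = rest := by simp
        rw [hd, ih f [] (cur.reverse :: acc) (by simp at h; omega)]
        simp only [pvSp, pvConsHead, List.reverse_cons, List.append_assoc, List.singleton_append]
        cases hsp : pvSp rest with
        | nil => exact absurd hsp (pvSp_ne_nil rest)
        | cons p ps => simp
      · rw [if_neg (by simp [List.isPrefixOf]; exact fun h => hc h.symm)]
        rw [ih f (c :: cur) acc (by simp at h; omega)]
        simp [pvSp, hc, pvConsHead_assoc]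

theorem pv_splitOn_eq_sp (s : List Char) : PySem.Chars.splitOn s ['|'] = pvSp s := by
  unfold PySem.Chars.splitOn
  rw [pv_splitOn_go s (s.length + 1) [] [] (by omega)]
  simp [pvConsHead_nil _ (pvSp_ne_nil s)]

theorem pv_dropWhile_prefix {p : Char → Bool} {l l' : List Char} (hl : List.dropWhile p l = l)
    (hp : l' <+: l) : List.dropWhile p l' = l' := by
  cases l' with
  | nil => simp
  | cons c cs =>
    cases l with
    | nil => simp at hp
    | cons d ds =>
      have hcd : c = d := by
        obtain ⟨t, ht⟩ := hp
        exact (List.cons_eq_cons.mp (by simpa using ht)).1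
      subst hcd
      have hpc : p c = false := by
        by_contra hb
        simp [eq_true_of_ne_false hb] at hl
        have := congrArg List.length hl
        simp at this
        have := List.length_dropWhile_le p ds
        omega
      simp [hpc]

theorem pv_rstrip_prefix (l : List Char) : PySem.Chars.rstrip l <+: l := by
  unfold PySem.Chars.rstrip
  have h := List.dropWhile_suffix (l := l.reverse) (p := PySem.Chars.isspace)
  have := List.reverse_prefix.mpr (by simpa using h)
  simpa using this

theorem pv_strip_idem (s : List Char) : PySem.Chars.strip (PySem.Chars.strip s) = PySem.Chars.strip s := by
  unfold PySem.Chars.strip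
  have h1 : PySem.Chars.lstrip (PySem.Chars.rstrip (PySem.Chars.lstrip s))
      = PySem.Chars.rstrip (PySem.Chars.lstrip s) := by
    unfold PySem.Chars.lstrip
    exact pv_dropWhile_prefix (by exact List.dropWhile_idempotent ..) (pv_rstrip_prefix _)
  rw [h1]
  unfold PySem.Chars.rstrip
  simp [List.dropWhile_idempotent]

theorem pv_goM0 (fuel : Nat) (l cur : List Char) (acc : List (List Char)) :
    PySem.Chars.splitOnMax.go [':'] fuel 0 l cur acc = ((cur.reverse ++ l) :: acc).reverse := by
  cases fuel with
  | zero => simp [PySem.Chars.splitOnMax.go]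
  | succ f => cases l <;> simp [PySem.Chars.splitOnMax.go]

theorem pv_go_gene (u : List Char) (f : Nat) :
    PySem.Chars.splitOnMax.go [':'] (f + 5) 1 ('G' :: 'e' :: 'n' :: 'e' :: ':' :: u) [] []
      = [['G', 'e', 'n', 'e'], u] := by
  simp only [PySem.Chars.splitOnMax.go, List.isPrefixOf]
  simp [pv_goM0]

theorem pv_split_gene (t : List Char)
    (h : PySem.Chars.startswith t ['G', 'e', 'n', 'e', ':'] = true) :
    PySem.List.pyGetD (PySem.Chars.splitOnMax t [':'] 1) 1 [] = t.drop 5 := by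
  have hpre : ['G', 'e', 'n', 'e', ':'] <+: t := by
    simpa [PySem.Chars.startswith] using h
  obtain ⟨u, hu⟩ := hpre
  subst hu
  have hlen : (['G', 'e', 'n', 'e', ':'] ++ u).length + 1 = u.length + 1 + 5 := by simp
  unfold PySem.Chars.splitOnMax
  rw [if_neg (by norm_num), hlen]
  rw [show (1 : Int).toNat = 1 from rfl]
  rw [show (['G', 'e', 'n', 'e', ':'] ++ u : List Char) = 'G' :: 'e' :: 'n' :: 'e' :: ':' :: u from rfl]
  rw [pv_go_gene u (u.length + 1)]
  simp [PySem.List.pyGetD, PySem.List.pyGet?, PySem.List.pyIdx?]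

theorem pv_slice5 (t : List Char) : PySem.List.slice t (some 5) none = t.drop 5 := by
  rw [PySem.List.slice_from t (by norm_num)]
  rfl

theorem pv_seg_case (cur : List Char) (o : Option (List Char)) :
    (if PySem.Chars.startswith (PySem.Chars.strip cur) ['G', 'e', 'n', 'e', ':'] then
        some (PySem.Chars.strip (PySem.List.slice (PySem.Chars.strip cur) (some 5) none))
      else o)
    = (if PySem.Chars.startswith (PySem.Chars.strip (PySem.Chars.strip cur)) ['G', 'e', 'n', 'e', ':'] then
        some (PySem.Chars.strip
          (PySem.List.pyGetD (PySem.Chars.splitOnMax (PySem.Chars.strip cur) [':'] 1) 1 []))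
      else o) := by
  rw [pv_strip_idem]
  by_cases hs : PySem.Chars.startswith (PySem.Chars.strip cur) ['G', 'e', 'n', 'e', ':'] = true
  · rw [if_pos hs, if_pos hs, pv_slice5, pv_split_gene _ hs]
  · rw [if_neg hs, if_neg hs]

theorem pv_main (cs : List Char) : ∀ (cur : List Char),
    pvGoB cur (cs ++ ['|']) = pvGoA ((pvConsHead cur (pvSp cs)).map PySem.Chars.strip) := by
  induction cs with
  | nil =>
    intro cur
    have hr : (pvConsHead cur (pvSp ([] : List Char))).map PySem.Chars.strip
        = [PySem.Chars.strip cur] := by simp [pvSp, pvConsHead]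
    rw [List.nil_append, hr]
    simp only [pvGoB, pvGoA]
    exact pv_seg_case cur none
  | cons c rest ih =>
    intro cur
    by_cases hc : c = '|'
    · subst hc
      have hr : (pvConsHead cur (pvSp ('|' :: rest))).map PySem.Chars.strip
          = PySem.Chars.strip cur :: (pvSp rest).map PySem.Chars.strip := by
        simp [pvSp, pvConsHead]
      rw [List.cons_append, hr]
      simp only [pvGoB, pvGoA]
      rw [ih [], pvConsHead_nil _ (pvSp_ne_nil rest)]
      exact pv_seg_case cur _
    · have hr : pvConsHead cur (pvSp (c :: rest)) = pvConsHead (cur ++ [c]) (pvSp rest) := by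
        rw [show pvSp (c :: rest) = pvConsHead [c] (pvSp rest) by simp [pvSp, hc], pvConsHead_assoc]
      rw [List.cons_append, hr]
      simp only [pvGoB, if_neg hc]
      exact ih (cur ++ [c])

theorem pv_eq (s : String) : extract_gene_name_py s = extract_gene_name_py_alt s := by
  unfold extract_gene_name_py extract_gene_name_py_alt
  rw [pv_splitOn_eq_sp, pv_main s.toList [], pvConsHead_nil _ (pvSp_ne_nil _)]

-- ===== VERDICT (by name: the statement is the Claim_ definition above) =====
theorem extract_gene_name_py_spec : Claim_equal_extract_gene_name_py := by
  intro s _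
  unfold Spec_extract_gene_name_py
  exact pv_eq s
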